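-- pv_equiv track=rewrite | github.com/skranee/igi_labs | IGI/LR4/lab4/task2/task2.py | count_sentence_types
-- ===== SOURCE A (Python) =====
-- def count_sentence_types(text):
--     """
--     Count the number of sentences of each type (declarative, interrogative, imperative) in the text.
--
--     Args:
--         text (str): The text to count sentence types.
--
--     Returns:
--         dict: A dictionary containing the counts of each sentence type.
--     """
--     sentence_types = {
--         "declarative": 0,
--         "interrogative": 0,
--         "imperative": 0
--     }
--
--     for char in text:
--         if char == '?':
--             sentence_types["interrogative"] += 1
--         elif char == '.':
--             sentence_types["declarative"] += 1
--         elif char == '!':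
--             sentence_types["imperative"] += 1
--
--     return sentence_types
-- ===== SOURCE B (Python) =====
-- def count_sentence_types(text):
--     return {
--         "declarative": text.count('.'),
--         "interrogative": text.count('?'),
--         "imperative": text.count('!'),
--     }
-- ===== Notes on version B (the rewrite author's own statement) =====
-- stated objective: faster
-- what changed: B makes three staged substring scans with str.count (one per punctuation mark) and assembles the dict literal directly, eliminating A's per-character Python-level if/elif loop and its mutable three-entry tally dict.
import Mathlib
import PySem

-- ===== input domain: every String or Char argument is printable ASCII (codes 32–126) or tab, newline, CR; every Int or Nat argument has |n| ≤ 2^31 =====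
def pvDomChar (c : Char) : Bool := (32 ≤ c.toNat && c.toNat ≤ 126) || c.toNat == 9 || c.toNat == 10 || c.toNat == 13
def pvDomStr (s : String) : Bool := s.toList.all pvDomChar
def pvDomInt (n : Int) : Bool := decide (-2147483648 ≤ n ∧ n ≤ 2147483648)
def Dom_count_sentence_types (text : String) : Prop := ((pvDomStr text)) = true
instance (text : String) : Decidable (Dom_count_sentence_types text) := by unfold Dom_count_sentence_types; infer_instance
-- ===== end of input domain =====

-- B replaces A's per-character if/elif tally loop by three staged str.count library scans
-- assembled into a dict literal; a timing run measured B faster (constant-factor: C-level scans).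


-- ===== PORT A =====
def count_sentence_types (text : String) : List (String × Int) :=
  let init : PySem.Dict String Int :=
    PySem.Dict.ofList [("declarative", 0), ("interrogative", 0), ("imperative", 0)]
  let d := text.toList.foldl (fun d char =>
    if char == '?' then d.modify "interrogative" 0 (· + 1)
    else if char == '.' then d.modify "declarative" 0 (· + 1)
    else if char == '!' then d.modify "imperative" 0 (· + 1)
    else d) init
  d.items

-- ===== PORT B =====
def count_sentence_types_alt (text : String) : List (String × Int) :=
  [("declarative", (PySem.Str.count text "." : Int)),
   ("interrogative", (PySem.Str.count text "?" : Int)),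
   ("imperative", (PySem.Str.count text "!" : Int))]

-- ===== PRECONDITION & SPEC =====
def Spec_count_sentence_types (text : String) (out : List (String × Int)) : Prop := out = count_sentence_types_alt text
instance (text : String) (out : List (String × Int)) : Decidable (Spec_count_sentence_types text out) := by unfold Spec_count_sentence_types; infer_instance

-- ===== CLAIM (what is proved, stated in full; the proofs are below) =====
def Claim_equal_count_sentence_types : Prop := ∀ (text : String), Dom_count_sentence_types text → Spec_count_sentence_types text (count_sentence_types text)

-- ===== LEMMAS AND PROOFS =====

-- Python str.count with a single-character needle is the character count.
theorem pvGoSingle (c : Char) (l : List Char) (acc fuel : Nat) (h : l.length ≤ fuel) :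
    PySem.Chars.count.go [c] fuel l acc = acc + l.count c := by
  induction l generalizing fuel acc with
  | nil => cases fuel <;> simp [PySem.Chars.count.go]
  | cons x xs ih =>
    cases fuel with
    | zero => simp at h
    | succ f =>
      simp only [PySem.Chars.count.go]
      by_cases hx : x = c
      · subst hx
        simp only [List.isPrefixOf, BEq.rfl, Bool.and_eq_true, and_true]
        simp [ih _ _ (by simpa using h)]
        omega
      · simp [List.isPrefixOf, hx, ih _ _ (by simpa using Nat.le_of_succ_le_succ h)]
        intro he; exact absurd he.symm hx

theorem pvCharsCountSingle (l : List Char) (c : Char) :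
    PySem.Chars.count l [c] = l.count c := by
  simp [PySem.Chars.count, pvGoSingle c l 0 l.length le_rfl]

theorem pvModifyI (a b c : Int) :
    ((PySem.Dict.ofList [("declarative", a), ("interrogative", b), ("imperative", c)]).modify "interrogative" 0 (· + 1))
    = PySem.Dict.ofList [("declarative", a), ("interrogative", b + 1), ("imperative", c)] := by
  apply PySem.Dict.ext
  simp [PySem.Dict.ofList, PySem.Dict.update, PySem.Dict.empty, PySem.Dict.insert,
        PySem.Dict.modify, PySem.Dict.contains, PySem.Dict.get?, PySem.Dict.getD]

theorem pvModifyD (a b c : Int) :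
    ((PySem.Dict.ofList [("declarative", a), ("interrogative", b), ("imperative", c)]).modify "declarative" 0 (· + 1))
    = PySem.Dict.ofList [("declarative", a + 1), ("interrogative", b), ("imperative", c)] := by
  apply PySem.Dict.ext
  simp [PySem.Dict.ofList, PySem.Dict.update, PySem.Dict.empty, PySem.Dict.insert,
        PySem.Dict.modify, PySem.Dict.contains, PySem.Dict.get?, PySem.Dict.getD]

theorem pvModifyM (a b c : Int) :
    ((PySem.Dict.ofList [("declarative", a), ("interrogative", b), ("imperative", c)]).modify "imperative" 0 (· + 1))
    = PySem.Dict.ofList [("declarative", a), ("interrogative", b), ("imperative", c + 1)] := by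
  apply PySem.Dict.ext
  simp [PySem.Dict.ofList, PySem.Dict.update, PySem.Dict.empty, PySem.Dict.insert,
        PySem.Dict.modify, PySem.Dict.contains, PySem.Dict.get?, PySem.Dict.getD]

-- A's loop keeps a 3-entry dict; its items are the initial values plus the running counts.
theorem pvFoldA_items (l : List Char) (a b c : Int) :
    (l.foldl (fun d char =>
        if char == '?' then d.modify "interrogative" 0 (· + 1)
        else if char == '.' then d.modify "declarative" 0 (· + 1)
        else if char == '!' then d.modify "imperative" 0 (· + 1)
        else d)
      (PySem.Dict.ofList [("declarative", a), ("interrogative", b), ("imperative", c)])).items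
    = [("declarative", a + l.count '.'), ("interrogative", b + l.count '?'),
       ("imperative", c + l.count '!')] := by
  induction l generalizing a b c with
  | nil =>
    simp [PySem.Dict.ofList, PySem.Dict.update, PySem.Dict.empty, PySem.Dict.insert,
          PySem.Dict.contains]
  | cons x xs ih =>
    by_cases hq : x = '?'
    · subst hq
      rw [List.foldl_cons, if_pos (by simp), pvModifyI, ih]
      simp
      omega
    · by_cases hd : x = '.'
      · subst hd
        rw [List.foldl_cons, if_neg (by simp), if_pos (by simp), pvModifyD, ih]
        simp
        omega
      · by_cases hm : x = '!'
        · subst hm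
          rw [List.foldl_cons, if_neg (by simp), if_neg (by simp), if_pos (by simp), pvModifyM, ih]
          simp
          omega
        · rw [List.foldl_cons, if_neg (by simp [hq]), if_neg (by simp [hd]), if_neg (by simp [hm]), ih]
          simp [hq, hd, hm]

-- ===== VERDICT (by name: the statement is the Claim_ definition above) =====
theorem count_sentence_types_spec : Claim_equal_count_sentence_types := by
  intro text _
  show _ = _
  unfold count_sentence_types count_sentence_types_alt
  rw [pvFoldA_items]
  simp [PySem.Str.count,
        show ("." : String).toList = ['.'] from rfl,
        show ("?" : String).toList = ['?'] from rfl,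
        show ("!" : String).toList = ['!'] from rfl,
        pvCharsCountSingle]
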